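-- pv_equiv track=rewrite | github.com/cltl/SPT_crowd_data_analysis | scripts/calculate_iaa.py | coder_pairs_unit
-- ===== SOURCE A (Python) =====
-- def coder_pairs_unit(workers):
--
--     pairs = set()
--     for i in workers:
--         for j in workers:
--             if i != j:
--                 pair = (i, j)
--                 pair_rev = (j, i)
--                 if pair_rev not in pairs:
--                     pairs.add(pair)
--     return pairs
-- ===== SOURCE B (Python) =====
-- def coder_pairs_unit(workers):
--     unique = list(dict.fromkeys(workers))
--     n = len(unique)
--     return {(unique[i], unique[j]) for i in range(n) for j in range(i + 1, n)}
-- ===== Notes on version B (the rewrite author's own statement) =====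
-- stated objective: faster
-- what changed: B deduplicates the workers once (dict.fromkeys) and then generates only the forward (earlier, later) index combinations i<j, instead of A's full n x n scan over the raw list guarded by a reverse-pair membership test.
import Mathlib
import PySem

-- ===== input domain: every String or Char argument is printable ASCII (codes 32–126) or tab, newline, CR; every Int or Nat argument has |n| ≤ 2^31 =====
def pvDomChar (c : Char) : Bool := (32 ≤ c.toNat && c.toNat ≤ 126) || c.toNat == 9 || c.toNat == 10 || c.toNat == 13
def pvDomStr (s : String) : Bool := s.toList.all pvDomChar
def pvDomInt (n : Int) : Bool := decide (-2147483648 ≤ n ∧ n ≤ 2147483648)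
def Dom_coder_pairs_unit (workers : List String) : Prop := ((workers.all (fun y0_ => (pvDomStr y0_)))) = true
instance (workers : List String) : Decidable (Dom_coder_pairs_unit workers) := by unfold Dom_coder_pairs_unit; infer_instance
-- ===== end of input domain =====

-- B deduplicates the workers once and then emits only the forward (earlier, later)
-- combinations recursively, replacing A's full n×n scan with its reverse-pair membership guard.


-- ===== PORT A =====
-- inner body: for j in workers: if i != j: if (j, i) not in pairs: pairs.add((i, j))
def cpuInnerA (i : String) (s : PySem.Set (String × String)) (j : String) : PySem.Set (String × String) :=
  if i ≠ j then
    (if ¬ (PySem.Set.contains s (j, i) = true) then PySem.Set.add s (i, j) else s)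
  else s

def coder_pairs_unit (workers : List String) : List (String × String) :=
  workers.foldl (fun pairs i => workers.foldl (cpuInnerA i) pairs) PySem.Set.empty

-- ===== PORT B =====
-- unique = list(dict.fromkeys(workers)); {(unique[i], unique[j]) for i in range(n) for j in range(i+1, n)}
-- (Source B's locals `unique` and `n` are inlined)
def coder_pairs_unit_alt (workers : List String) : List (String × String) :=
  PySem.Set.ofList
    ((PySem.List.pyRange 0 ((PySem.List.dedup workers).length : Int) 1).flatMap (fun i =>
      (PySem.List.pyRange (i + 1) ((PySem.List.dedup workers).length : Int) 1).map (fun j =>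
        (PySem.List.pyGetD (PySem.List.dedup workers) i "",
         PySem.List.pyGetD (PySem.List.dedup workers) j ""))))

-- ===== PRECONDITION & SPEC =====
def Spec_coder_pairs_unit (workers : List String) (out : List (String × String)) : Prop := out = coder_pairs_unit_alt workers
instance (workers : List String) (out : List (String × String)) : Decidable (Spec_coder_pairs_unit workers out) := by unfold Spec_coder_pairs_unit; infer_instance

-- ===== CLAIM (what is proved, stated in full; the proofs are below) =====
def Claim_equal_coder_pairs_unit : Prop := ∀ (workers : List String), Dom_coder_pairs_unit workers → Spec_coder_pairs_unit workers (coder_pairs_unit workers)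

-- ===== LEMMAS AND PROOFS =====

-- the pair list B's comprehension produces, in recursive form
def cpuForwardPairs : List String → List (String × String)
  | [] => []
  | head :: rest => rest.map (fun y => (head, y)) ++ cpuForwardPairs rest

-- B's double index comprehension equals cpuForwardPairs of the dropped suffix
theorem cpuGen (u : List String) (a : Nat) :
    (PySem.List.pyRange (a : Int) (u.length : Int) 1).flatMap (fun i =>
      (PySem.List.pyRange (i + 1) (u.length : Int) 1).map (fun j =>
        (PySem.List.pyGetD u i "", PySem.List.pyGetD u j ""))) = cpuForwardPairs (u.drop a) := by
  induction hfuel : u.length - a generalizing a with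
  | zero =>
    have ha : u.length ≤ a := by omega
    rw [PySem.List.pyRange_one_eq_nil (by exact_mod_cast ha),
        List.drop_eq_nil_of_le ha]
    rfl
  | succ n ih =>
    have ha : a < u.length := by omega
    rw [PySem.List.pyRange_one_cons (by exact_mod_cast ha), List.flatMap_cons]
    have hcast : ((a : Int) + 1) = (((a + 1 : Nat)) : Int) := by push_cast; ring
    have hinner : (PySem.List.pyRange ((a : Int) + 1) (u.length : Int) 1).map
        (fun j => PySem.List.pyGetD u j "") = u.drop (a + 1) := by
      rw [PySem.List.map_pyGetD_pyRange' u "" (by omega), show ((a : Int) + 1).toNat = a + 1 from by omega]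
    have hhead : (PySem.List.pyRange ((a : Int) + 1) (u.length : Int) 1).map
        (fun j => (PySem.List.pyGetD u (a : Int) "", PySem.List.pyGetD u j "")) =
        (u.drop (a + 1)).map (fun y => (u[a], y)) := by
      have : (fun j => (PySem.List.pyGetD u (a : Int) "", PySem.List.pyGetD u j "")) =
          (fun y => (PySem.List.pyGetD u (a : Int) "", y)) ∘ (fun j => PySem.List.pyGetD u j "") := rfl
      rw [this, ← List.map_map, hinner]
      have hg : PySem.List.pyGetD u (a : Int) "" = u[a] := by
        rw [PySem.List.pyGetD_natCast]
        exact List.getD_eq_getElem u "" ha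
      rw [hg]
    rw [hhead, hcast, ih (a + 1) (by omega), List.drop_eq_getElem_cons ha]
    rfl

theorem cpuGenZero (u : List String) :
    (PySem.List.pyRange 0 (u.length : Int) 1).flatMap (fun i =>
      (PySem.List.pyRange (i + 1) (u.length : Int) 1).map (fun j =>
        (PySem.List.pyGetD u i "", PySem.List.pyGetD u j ""))) = cpuForwardPairs u := by
  have h := cpuGen u 0
  simpa using h

-- cpuPfun u k = the pair set A has accumulated after fully processing the first k distinct workers
def cpuPfun : List String → Nat → List (String × String)
  | _, 0 => []
  | [], _ + 1 => []
  | x :: rest, k + 1 => rest.map (fun y => (x, y)) ++ cpuPfun rest k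

theorem cpuPfun_zero (u : List String) : cpuPfun u 0 = [] := by cases u <;> rfl

theorem cpuPfun_full (u : List String) : cpuPfun u u.length = cpuForwardPairs u := by
  induction u with
  | nil => rfl
  | cons x rest ih => simp [cpuPfun, cpuForwardPairs, ih]

theorem cpuMem_Pfun (u : List String) (k : Nat) (a b : String) :
    (a, b) ∈ cpuPfun u k ↔ ∃ i : Nat, ∃ h : i < u.length, i < k ∧ u[i] = a ∧ b ∈ u.drop (i + 1) := by
  induction u generalizing k with
  | nil => cases k <;> simp [cpuPfun]
  | cons x rest ih =>
    cases k with
    | zero => simp [cpuPfun]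
    | succ k =>
      simp only [cpuPfun, List.mem_append, List.mem_map, ih]
      constructor
      · rintro (⟨y, hy, hxy⟩ | ⟨i, hi, hik, hget, hb⟩)
        · obtain ⟨h1, h2⟩ : x = a ∧ y = b := Prod.mk.injEq .. ▸ hxy
          exact ⟨0, by simp, by omega, by simpa using h1, by simpa using h2 ▸ hy⟩
        · exact ⟨i + 1, by simpa using hi, by omega, by simpa using hget, by simpa using hb⟩
      · rintro ⟨i, hi, hik, hget, hb⟩
        cases i with
        | zero => exact Or.inl ⟨b, by simpa using hb, by simp at hget; simp [hget]⟩
        | succ i =>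
          exact Or.inr ⟨i, by simpa using hi, by omega, by simpa using hget, by simpa using hb⟩

-- generic inner-loop collapse: under the reverse-membership invariant the inner loop is a Set.update
theorem cpuInner_fold (x : String) (pre : List String)
    (js : List String) (s : List (String × String))
    (hrev : ∀ j, (j, x) ∈ s ↔ j ∈ pre) :
    js.foldl (cpuInnerA x) s =
      PySem.Set.update s ((js.filter (fun j => decide ¬(j ∈ pre ∨ j = x))).map (fun j => (x, j))) := by
  induction js generalizing s with
  | nil => simp [PySem.Set.update_nil]
  | cons j rest ih =>
    rw [List.foldl_cons]
    by_cases hjx : j = x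
    · have h1 : cpuInnerA x s j = s := by subst hjx; simp [cpuInnerA]
      rw [h1, List.filter_cons_of_neg (by simp [hjx])]
      exact ih s hrev
    · by_cases hjpre : j ∈ pre
      · have hmem : (j, x) ∈ s := (hrev j).mpr hjpre
        have h1 : cpuInnerA x s j = s := by
          simp [cpuInnerA, hmem]
        rw [h1, List.filter_cons_of_neg (by simp [hjpre])]
        exact ih s hrev
      · have hnm : (j, x) ∉ s := fun h => hjpre ((hrev j).mp h)
        have h1 : cpuInnerA x s j = PySem.Set.add s (x, j) := by
          unfold cpuInnerA
          rw [if_pos (Ne.symm hjx), if_pos]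
          exact fun hcon => hnm ((PySem.Set.contains_iff s (j, x)).mp hcon)
        rw [h1, List.filter_cons_of_pos (by simp [hjpre, hjx]), List.map_cons, PySem.Set.update_cons]
        refine ih (PySem.Set.add s (x, j)) ?_
        intro j'
        rw [PySem.Set.mem_add]
        constructor
        · rintro (h | h)
          · exact (hrev j').mp h
          · exact absurd (congrArg Prod.snd h).symm hjx
        · intro h; exact Or.inl ((hrev j').mpr h)

-- dedup commutes with filter
theorem cpuDedup_filter (p : String → Bool) (l : List String) :
    PySem.List.dedup (l.filter p) = (PySem.List.dedup l).filter p := by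
  simp only [PySem.List.dedup_eq_ofList]
  induction l with
  | nil => simp [PySem.Set.ofList_nil]
  | cons j rest ih =>
    by_cases hpj : p j = true
    · rw [List.filter_cons_of_pos hpj, PySem.Set.ofList_cons, PySem.Set.ofList_cons,
          List.filter_cons_of_pos hpj, ih]
      -- discard (filter p s) j = filter p (discard s j)
      congr 1
      simp only [PySem.Set.discard]
      exact List.filter_comm _ _ _
    · rw [List.filter_cons_of_neg (by simp [hpj]), PySem.Set.ofList_cons, ih,
          List.filter_cons_of_neg (by simp [hpj])]
      simp only [PySem.Set.discard]
      rw [List.filter_comm]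
      exact (List.filter_eq_self.mpr (fun a ha => by
        have hpa := (List.mem_filter.mp ha).2
        have : a ≠ j := fun h => by rw [h] at hpa; exact hpj hpa
        simp [this])).symm

-- dedup commutes with an injective-in-second-component map
theorem cpuDedup_map_pair (x : String) (l : List String) :
    PySem.Set.ofList (l.map (fun j => (x, j))) = (PySem.List.dedup l).map (fun j => (x, j)) := by
  simp only [PySem.List.dedup_eq_ofList]
  induction l with
  | nil => simp [PySem.Set.ofList_nil]
  | cons j rest ih =>
    rw [List.map_cons, PySem.Set.ofList_cons, PySem.Set.ofList_cons, ih, List.map_cons]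
    congr 1
    simp only [PySem.Set.discard, List.filter_map]
    congr 1
    exact List.filter_congr (fun a _ => by by_cases h : a = j <;> simp [h, Prod.ext_iff])

-- STEP: processing a brand-new distinct worker u[k] extends the state from cpuPfun u k to cpuPfun u (k+1)
theorem cpuPfun_succ (u : List String) (k : Nat) (h : k < u.length) :
    cpuPfun u (k + 1) = cpuPfun u k ++ (u.drop (k + 1)).map (fun y => (u[k], y)) := by
  induction u generalizing k with
  | nil => simp at h
  | cons x rest ih =>
    cases k with
    | zero => simp [cpuPfun, cpuPfun_zero]
    | succ k =>
      simp only [cpuPfun, List.drop_succ_cons, List.getElem_cons_succ]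
      rw [ih k (by simpa using h)]
      simp

theorem cpuStep (u : List String) (k : Nat) (hk : k < u.length) (hnd : u.Nodup)
    (js : List String) (hdd : PySem.List.dedup js = u) :
    js.foldl (cpuInnerA u[k]) (cpuPfun u k) = cpuPfun u (k + 1) := by
  have hrev : ∀ j, (j, u[k]) ∈ cpuPfun u k ↔ j ∈ u.take k := by
    intro j
    rw [cpuMem_Pfun]
    constructor
    · rintro ⟨i, hi, hik, hget, _⟩
      rw [List.mem_take_iff_getElem]
      exact ⟨i, by omega, hget⟩
    · intro hj
      rw [List.mem_take_iff_getElem] at hj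
      obtain ⟨i, hi, hji⟩ := hj
      refine ⟨i, by omega, by omega, hji, ?_⟩
      rw [List.mem_drop_iff_getElem]
      exact ⟨k - (i + 1), by omega, by congr 1; omega⟩
  rw [cpuInner_fold u[k] (u.take k) js (cpuPfun u k) hrev,
      PySem.Set.update_eq_append_filter, cpuDedup_map_pair, cpuDedup_filter]
  have hded : (PySem.List.dedup js).filter (fun j => decide ¬(j ∈ u.take k ∨ j = u[k])) = u.drop (k + 1) := by
    rw [hdd]
    have hk1 : u = u.take k ++ u[k] :: u.drop (k + 1) := by
      conv_lhs => rw [← List.take_append_drop k u]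
      rw [List.drop_eq_getElem_cons hk]
    set p : String → Bool := fun j => decide ¬(j ∈ List.take k u ∨ j = u[k]) with hp
    conv_lhs => rw [hk1]
    rw [List.filter_append, List.filter_cons]
    have h1 : (u.take k).filter p = [] :=
      List.filter_eq_nil_iff.mpr (fun a ha => by simp [hp, ha])
    have h2 : p u[k] = false := by simp [hp]
    have h3 : (u.drop (k + 1)).filter p = u.drop (k + 1) := by
      rw [List.filter_eq_self]
      intro a ha
      rw [List.mem_drop_iff_getElem] at ha
      obtain ⟨m, hm, ham⟩ := ha
      have hnt : a ∉ u.take k := by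
        intro hat
        rw [List.mem_take_iff_getElem] at hat
        obtain ⟨i', hi', h'⟩ := hat
        have := (List.Nodup.getElem_inj_iff hnd).mp (ham.trans h'.symm)
        omega
      have hne : a ≠ u[k] := by
        intro hax
        have := (List.Nodup.getElem_inj_iff hnd).mp (ham.trans hax)
        omega
      simp [hp, hnt, hne]
    rw [h1, h2, h3]
    simp
  rw [hded]
  have hfilter_id : (((u.drop (k + 1)).map (fun j => (u[k], j))).filter
      (fun y => !(PySem.Set.contains (cpuPfun u k) y))) = (u.drop (k + 1)).map (fun j => (u[k], j)) := by
    rw [List.filter_eq_self]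
    rintro p hp
    obtain ⟨j, hj, rfl⟩ := List.mem_map.mp hp
    have : (u[k], j) ∉ cpuPfun u k := by
      rw [cpuMem_Pfun]
      rintro ⟨i, hi, hik, hget, -⟩
      have : i = k := (List.Nodup.getElem_inj_iff hnd).mp hget
      omega
    simp [this]
  rw [hfilter_id, cpuPfun_succ u k hk]

-- NOOP: re-processing an already-seen worker leaves the state unchanged
theorem cpuNoop (u : List String) (k : Nat) (hk : k ≤ u.length) (hnd : u.Nodup) (x : String)
    (hx : x ∈ u.take k)
    (js : List String) (hjs : ∀ j ∈ js, j ∈ u) :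
    js.foldl (cpuInnerA x) (cpuPfun u k) = cpuPfun u k := by
  rw [List.mem_take_iff_getElem] at hx
  obtain ⟨i, hi, hxi⟩ := hx
  have hiu : i < u.length := by omega
  have hik : i < k := by omega
  have hrev : ∀ j, (j, x) ∈ cpuPfun u k ↔ j ∈ u.take i := by
    intro j
    rw [cpuMem_Pfun]
    constructor
    · rintro ⟨i', hi', hik', hget, hb⟩
      subst hxi
      rw [List.mem_drop_iff_getElem] at hb
      obtain ⟨m, hm, hmi⟩ := hb
      have : i' + 1 + m = i := (List.Nodup.getElem_inj_iff hnd).mp hmi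
      rw [List.mem_take_iff_getElem]
      exact ⟨i', by omega, hget⟩
    · intro hj
      rw [List.mem_take_iff_getElem] at hj
      obtain ⟨i', hi', hji'⟩ := hj
      refine ⟨i', by omega, by omega, hji', ?_⟩
      rw [List.mem_drop_iff_getElem]
      exact ⟨i - (i' + 1), by omega, by rw [← hxi]; congr 1; omega⟩
  rw [cpuInner_fold x (u.take i) js (cpuPfun u k) hrev,
      PySem.Set.update_eq_append_filter, cpuDedup_map_pair, cpuDedup_filter]
  have hnil : (((PySem.List.dedup js).filter (fun j => decide ¬(j ∈ u.take i ∨ j = x))).map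
      (fun j => (x, j))).filter (fun y => !(PySem.Set.contains (cpuPfun u k) y)) = [] := by
    rw [List.filter_eq_nil_iff]
    rintro p hp
    obtain ⟨j, hj, rfl⟩ := List.mem_map.mp hp
    rw [List.mem_filter] at hj
    obtain ⟨hjd, hjcond⟩ := hj
    have hju : j ∈ u := hjs j ((PySem.List.mem_dedup js j).mp hjd)
    have hjti : j ∉ u.take i ∧ j ≠ x := by simpa using hjcond
    -- j occurs in u strictly after position i
    obtain ⟨m, hm, hjm⟩ := List.mem_iff_getElem.mp hju
    have hmi : i < m := by
      rcases Nat.lt_trichotomy m i with h | h | h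
      · exact absurd (List.mem_take_iff_getElem.mpr ⟨m, by omega, hjm⟩) hjti.1
      · subst h; exact absurd (hjm.symm.trans hxi) hjti.2
      · exact h
    have hmem : (x, j) ∈ cpuPfun u k := by
      rw [cpuMem_Pfun]
      refine ⟨i, hiu, hik, hxi, ?_⟩
      rw [List.mem_drop_iff_getElem]
      exact ⟨m - (i + 1), by omega, by rw [← hjm]; congr 1; omega⟩
    simp [hmem]
  rw [hnil, List.append_nil]

-- s is a prefix of s.update(l)
theorem cpuPrefix_update (l : List String) (s : List String) : s <+: PySem.Set.update s l := by
  induction l generalizing s with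
  | nil => simp [PySem.Set.update_nil]
  | cons a rest ih =>
    rw [PySem.Set.update_cons]
    refine List.IsPrefix.trans ?_ (ih (PySem.Set.add s a))
    rw [PySem.Set.add_eq_ite]
    split
    · exact List.prefix_refl s
    · exact ⟨[a], rfl⟩

-- OUTER loop: folding A's outer loop over todo, having already seen the prefix `seen` of u
theorem cpuOuterAux (workers u : List String) (hnd : u.Nodup) (hjs : ∀ j ∈ workers, j ∈ u)
    (hdd : PySem.List.dedup workers = u)
    (todo : List String) (seen : List String) (hpre : seen <+: u)
    (hupd : PySem.Set.update seen todo = u) :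
    todo.foldl (fun pairs i => workers.foldl (cpuInnerA i) pairs) (cpuPfun u seen.length) =
      cpuPfun u u.length := by
  induction todo generalizing seen with
  | nil =>
    rw [PySem.Set.update_nil] at hupd
    simp [hupd]
  | cons x rest ih =>
    rw [PySem.Set.update_cons] at hupd
    rw [List.foldl_cons]
    have hseen : seen = u.take seen.length := (List.prefix_iff_eq_take.mp hpre)
    by_cases hxs : x ∈ seen
    · rw [PySem.Set.add_of_mem hxs] at hupd
      rw [cpuNoop u seen.length hpre.length_le hnd x (hseen ▸ hxs) workers hjs]
      exact ih seen hpre hupd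
    · rw [PySem.Set.add_of_not_mem hxs] at hupd
      have hpre' : seen ++ [x] <+: u := hupd ▸ cpuPrefix_update rest (seen ++ [x])
      have hklen : seen.length < u.length := by
        have := hpre'.length_le
        simp at this; omega
      have hxk : u[seen.length] = x := by
        have h := List.prefix_iff_eq_take.mp hpre'
        have h2 : (seen ++ [x])[seen.length]'(by simp) = (u.take (seen ++ [x]).length)[seen.length]'(by rw [← h]; simp) := by
          congr 1
        have h3 : x = u[seen.length] := by simpa using h2
        exact h3.symm
      rw [← hxk, cpuStep u seen.length hklen hnd workers hdd]
      have : (seen ++ [x]).length = seen.length + 1 := by simp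
      exact this ▸ ih (seen ++ [x]) hpre' hupd

theorem cpuOuter (workers : List String) :
    coder_pairs_unit workers =
      cpuPfun (PySem.List.dedup workers) (PySem.List.dedup workers).length := by
  unfold coder_pairs_unit
  have h := cpuOuterAux workers (PySem.List.dedup workers) (PySem.List.nodup_dedup workers)
    (fun j hj => (PySem.List.mem_dedup workers j).mpr hj) rfl workers [] (List.nil_prefix)
    (by rw [show ([] : List String) = (PySem.Set.empty : PySem.Set String) from rfl,
            PySem.Set.update_empty]; simp)
  simpa [cpuPfun_zero, PySem.Set.empty] using h

theorem cpuFst_mem (l : List String) (a b : String) (h : (a, b) ∈ cpuForwardPairs l) : a ∈ l := by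
  induction l with
  | nil => simp [cpuForwardPairs] at h
  | cons x rest ih =>
    simp only [cpuForwardPairs, List.mem_append, List.mem_map] at h
    rcases h with ⟨y, _, hxy⟩ | h
    · simp [← (Prod.mk.injEq .. ▸ hxy).1]
    · exact List.mem_cons_of_mem x (ih h)

theorem cpuNodup_forward (u : List String) (h : u.Nodup) : (cpuForwardPairs u).Nodup := by
  induction u with
  | nil => simp [cpuForwardPairs]
  | cons x rest ih =>
    rw [List.nodup_cons] at h
    refine List.Nodup.append ?_ (ih h.2) ?_
    · exact h.2.map (fun a b hab => (Prod.mk.injEq .. ▸ hab).2)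
    · intro p hp1 hp2
      obtain ⟨y, _, rfl⟩ := List.mem_map.mp hp1
      exact h.1 (cpuFst_mem rest x y hp2)

-- ===== VERDICT (by name: the statement is the Claim_ definition above) =====
theorem coder_pairs_unit_spec : Claim_equal_coder_pairs_unit := by
  intro workers _
  unfold Spec_coder_pairs_unit coder_pairs_unit_alt
  rw [cpuOuter, cpuPfun_full, cpuGenZero]
  exact (PySem.Set.ofList_eq_self_of_nodup _
    (cpuNodup_forward _ (PySem.List.nodup_dedup workers))).symm
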